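/- GENERATED by mk_final_copies.py from the proof of the farm's unit `neighbors` (farm:neighbors.2: Lemmas.lean) as the
   re-elaboration sweep compiled it — do not edit. -/
import Asan.CheckWalk
import Vorbis.Spec.Units.neighbors

/-!
  The unit `neighbors` (stb_vorbis_fixed.c 1330–1339): the pure facts of its proof (bit-level forms of the branch conditions,
  the two content invariants of the loop and their steps), and `neighbors_pos`: the function satisfies its contract (whose pre,
  since freeze-7, has `0 < n`: the farm worker of freeze-6, attempt 1, returned the CONTRACT-PRE problem "with `n ≤ 0` the pre says
  nothing about `plow` / `phigh`, the post's `*plow unchanged` is false" together with this walk of the case `0 < n`).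
-/

open X86 X86.User Asan Vorbis

namespace Vorbis.Spec.neighbors

/-! ### Bit-level forms -/

/-- A 32-bit value whose signed reading is the natural number `n` is `n`, and `n < 2^31`. -/
theorem eq_ofNat_of_toInt (b : BitVec 32) (n : Nat) (h : b.toInt = (n : Int)) :
    b = BitVec.ofNat 32 n ∧ n < 2 ^ 31 := by
  have hb := b.isLt
  rw [BitVec.toInt_eq_toNat_cond] at h
  have hlt : n < 2 ^ 31 ∧ b.toNat = n := by
    split at h <;> omega
  refine ⟨?_, hlt.1⟩
  apply BitVec.eq_of_toNat_eq
  rw [BitVec.toNat_ofNat, Nat.mod_eq_of_lt (by omega)]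
  exact hlt.2

/-- The signed reading of a small 32-bit number. -/
theorem toInt_small32 (k : Nat) (h : k < 2 ^ 31) : (BitVec.ofNat 32 k).toInt = (k : Int) := by
  rw [Vorbis.Spec.toInt_of_lt _ (by rw [Vorbis.Spec.toNat_ofNat32 _ (by omega)]; exact h)]
  rw [Vorbis.Spec.toNat_ofNat32 _ (by omega)]

/-- `movsxd` of a small non-negative 32-bit number. -/
theorem sext_ofNat32 (i : Nat) (hi : i < 2 ^ 31) :
    Word.ofBV (BitVec.signExtend 64 (BitVec.ofNat 32 i)) = UInt64.ofNat i := by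
  apply UInt64.toNat_inj.mp
  rw [Vorbis.Spec.toNat_sext32 _ (by rw [Vorbis.Spec.toNat_ofNat32 _ (by omega)]; exact hi)]
  rw [Vorbis.Spec.toNat_ofNat32 _ (by omega)]
  rw [UInt64.toNat_ofNat', Nat.mod_eq_of_lt (by omega)]

/-- `add ebx, 1` on the counter. -/
theorem ofNat_succ32 (i : Nat) : BitVec.ofNat 32 i + 1#32 = BitVec.ofNat 32 (i + 1) := by
  rw [BitVec.ofNat_add]

/-- The loop test `cmp ebx, r13d ; jge` not taken: `i < n`. -/
theorem lt_of_not_le32 (n i : Nat) (hn : n < 2 ^ 31) (hi : i < 2 ^ 31)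
    (h : ¬ (BitVec.ofNat 32 n).toInt ≤ (BitVec.ofNat 32 i).toInt) : i < n := by
  rw [toInt_small32 n hn, toInt_small32 i hi] at h
  omega

/-- The loop test `cmp ebx, r13d ; jge` taken: `n ≤ i`. -/
theorem le_of_le32 (n i : Nat) (hn : n < 2 ^ 31) (hi : i < 2 ^ 31)
    (h : (BitVec.ofNat 32 n).toInt ≤ (BitVec.ofNat 32 i).toInt) : n ≤ i := by
  rw [toInt_small32 n hn, toInt_small32 i hi] at h
  omega

/-- `movzx r12d, word [rbp] ; movzx eax, r12w`, read as a signed 32-bit number: the 16-bit value itself. -/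
theorem zx_toInt (x : Nat) (h : x < 65536) :
    (BitVec.zeroExtend 32 (BitVec.setWidth 16 (BitVec.zeroExtend 32 (BitVec.ofNat 16 x)))).toInt = (x : Int) := by
  rw [BitVec.toInt_eq_toNat_cond]
  simp only [BitVec.zeroExtend, BitVec.toNat_setWidth, BitVec.toNat_ofNat]
  omega

/-- `r12w` of `movzx r12d, word [rbp]`, as a number. -/
theorem sw_toNat (x : Nat) (h : x < 65536) :
    (BitVec.setWidth 16 (BitVec.zeroExtend 32 (BitVec.ofNat 16 x))).toNat = x := by
  simp only [BitVec.zeroExtend, BitVec.toNat_setWidth, BitVec.toNat_ofNat]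
  omega

/-- The dword stored by `mov [rsp+8], eax` after `movzx eax, word [rbp]`. -/
theorem zx_toNat (x : Nat) (h : x < 65536) : (BitVec.zeroExtend 32 (BitVec.ofNat 16 x)).toNat = x := by
  simp only [BitVec.zeroExtend, BitVec.toNat_setWidth, BitVec.toNat_ofNat]
  omega

/-- The address of `x[i]` as the walker writes it (`lea rbp, [r14 + rax*2]`). -/
theorem addr_idx (w : Word) (i : Nat) (h : w.toNat + 2 * i < 2 ^ 64) :
    addr (w.toNat + 2 * i) = w + UInt64.ofNat i * 2 := by
  unfold addr
  apply UInt64.toNat_inj.mp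
  u_omega

/-! ### The content invariants of the loop (line 1335), over plain numbers -/

/-- **`low` and `*plow` after `i` rounds**: `X` the array, `xn = x[n]`, `lo` the dword of the slot `low`, `pv` the dword at
`plow`, `p0` its value at the function's entry. Either nothing below `xn` was seen (`low = -1`, `*plow` untouched), or
`*plow = j < i` with `low = x[j] < xn`. -/
def LowInv (X : Nat → Nat) (xn i lo pv p0 : Nat) : Prop :=
  (lo = 4294967295 ∧ pv = p0 ∧ ∀ j, j < i → ¬ X j < xn) ∨
  (∃ j, j < i ∧ pv = j ∧ lo = X j ∧ X j < xn)

/-- **`high` and `*phigh` after `i` rounds**: either nothing above `xn` was seen (`high = 65536`, `*phigh` untouched), or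
`*phigh = j < i` with `high = x[j] > xn`. -/
def HighInv (X : Nat → Nat) (xn i hi qv q0 : Nat) : Prop :=
  (hi = 65536 ∧ qv = q0 ∧ ∀ j, j < i → ¬ xn < X j) ∨
  (∃ j, j < i ∧ qv = j ∧ hi = X j ∧ xn < X j)

variable {X : Nat → Nat} {xn i lo hi pv qv p0 q0 n : Nat}

/-- Before the first round. -/
theorem LowInv.init : LowInv X xn 0 4294967295 p0 p0 :=
  Or.inl ⟨rfl, rfl, fun j hj => absurd hj (Nat.not_lt_zero j)⟩

/-- Before the first round. -/
theorem HighInv.init : HighInv X xn 0 65536 q0 q0 :=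
  Or.inl ⟨rfl, rfl, fun j hj => absurd hj (Nat.not_lt_zero j)⟩

/-- 0x104a79 `jle` taken (`x[i] ≤ low`, signed): `low` is not `-1`, nothing changes. -/
theorem LowInv.skip_le (h : LowInv X xn i lo pv p0)
    (hbr : (X i : Int) ≤ (BitVec.ofNat 32 lo).toInt) : LowInv X xn (i + 1) lo pv p0 := by
  rcases h with ⟨h1, _, _⟩ | ⟨j, hj, h2, h3, h4⟩
  · exfalso
    rw [h1] at hbr
    have e : (BitVec.ofNat 32 4294967295).toInt = -1 := by decide
    omega
  · exact Or.inr ⟨j, by omega, h2, h3, h4⟩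

/-- 0x104a8e `jae` taken (`x[i] ≥ x[n]`): nothing changes. -/
theorem LowInv.skip_ge (h : LowInv X xn i lo pv p0) (hbr : xn ≤ X i) : LowInv X xn (i + 1) lo pv p0 := by
  rcases h with ⟨h1, h2, h3⟩ | ⟨j, hj, h2, h3, h4⟩
  · refine Or.inl ⟨h1, h2, ?_⟩
    intro j hj
    by_cases hji : j = i
    · subst hji
      omega
    · exact h3 j (by omega)
  · exact Or.inr ⟨j, by omega, h2, h3, h4⟩

/-- 0x104a9d – 0x104aa4: `*plow = i ; low = x[i]` with `x[i] < x[n]`. -/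
theorem LowInv.update (hbr : X i < xn) : LowInv X xn (i + 1) (X i) i p0 :=
  Or.inr ⟨i, Nat.lt_succ_self i, rfl, rfl, hbr⟩

/-- 0x104a24 `jge` taken (`x[i] ≥ high`, signed): `high` is not `65536`, nothing changes. -/
theorem HighInv.skip_ge (h : HighInv X xn i hi qv q0) (hX : ∀ j, X j < 65536)
    (hbr : (BitVec.ofNat 32 hi).toInt ≤ (X i : Int)) : HighInv X xn (i + 1) hi qv q0 := by
  rcases h with ⟨h1, _, _⟩ | ⟨j, hj, h2, h3, h4⟩
  · exfalso
    rw [h1] at hbr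
    have e : (BitVec.ofNat 32 65536).toInt = 65536 := by decide
    have := hX i
    omega
  · exact Or.inr ⟨j, by omega, h2, h3, h4⟩

/-- 0x104a39 `jae` taken (`x[n] ≥ x[i]`): nothing changes. -/
theorem HighInv.skip_le (h : HighInv X xn i hi qv q0) (hbr : X i ≤ xn) : HighInv X xn (i + 1) hi qv q0 := by
  rcases h with ⟨h1, h2, h3⟩ | ⟨j, hj, h2, h3, h4⟩
  · refine Or.inl ⟨h1, h2, ?_⟩
    intro j hj
    by_cases hji : j = i
    · subst hji
      omega
    · exact h3 j (by omega)
  · exact Or.inr ⟨j, by omega, h2, h3, h4⟩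

/-- 0x104a48 – 0x104a4f: `*phigh = i ; high = x[i]` with `x[i] > x[n]`. -/
theorem HighInv.update (hbr : xn < X i) : HighInv X xn (i + 1) (X i) i q0 :=
  Or.inr ⟨i, Nat.lt_succ_self i, rfl, rfl, hbr⟩

/-- **The two clauses of the contract's post about `*plow`**, from the invariant at the loop's exit (`i = n`). -/
theorem LowInv.post (h : LowInv X xn n lo pv p0) :
    ((∃ i : Nat, (i : Int) < (n : Int) ∧ X i < xn) → ((pv : Int) < (n : Int) ∧ X pv < xn)) ∧
    (¬ (∃ i : Nat, (i : Int) < (n : Int) ∧ X i < xn) → pv = p0) := by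
  rcases h with ⟨_, h2, h3⟩ | ⟨j, hj, h2, _, h4⟩
  · refine ⟨?_, fun _ => h2⟩
    rintro ⟨k, hk, hlt⟩
    exact absurd hlt (h3 k (by omega))
  · subst h2
    refine ⟨fun _ => ⟨by omega, h4⟩, ?_⟩
    intro hno
    exact absurd ⟨pv, by omega, h4⟩ hno

/-- **The two clauses of the contract's post about `*phigh`**, from the invariant at the loop's exit (`i = n`). -/
theorem HighInv.post (h : HighInv X xn n hi qv q0) :
    ((∃ i : Nat, (i : Int) < (n : Int) ∧ xn < X i) → ((qv : Int) < (n : Int) ∧ xn < X qv)) ∧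
    (¬ (∃ i : Nat, (i : Int) < (n : Int) ∧ xn < X i) → qv = q0) := by
  rcases h with ⟨_, h2, h3⟩ | ⟨j, hj, h2, _, h4⟩
  · refine ⟨?_, fun _ => h2⟩
    rintro ⟨k, hk, hlt⟩
    exact absurd hlt (h3 k (by omega))
  · subst h2
    refine ⟨fun _ => ⟨by omega, h4⟩, ?_⟩
    intro hno
    exact absurd ⟨qv, by omega, h4⟩ hno


/-- The loop counter `ebx` (zero-extended into rbx) as a number. -/
theorem cnt_toNat (k : Nat) (h : k < 2 ^ 32) : (Word.ofBV (BitVec.ofNat 32 k)).toNat = k := by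
  rw [Vorbis.toNat_ofBV32, Vorbis.Spec.toNat_ofNat32 _ h]


set_option maxRecDepth 4000
set_option maxHeartbeats 64000000

/-- **`neighbors` satisfies its contract on every entry state** (`0 < n` is a clause of the contract's pre). One loop
(0x104a56, line 1335) with nine paths through its body (three outcomes for `low`, three for `high`), five check sites. -/
theorem neighbors_pos (Lay : Layout) (hLay : Lay.hi = 0x1000000) (μ : Microarch) (hμ : UserX.MicroOK μ) (u₀ : State)
    (hcode : HasCodeNat Lay u₀ Vorbis.L.neighbors.entry Vorbis.Code.code_neighbors.nat Vorbis.L.neighbors.size)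
    (hload2 : Asan.SmallCheck Lay μ Vorbis.WayInv (Vorbis.CodeOK u₀) [.rax, .rcx, .rdx] 2 Vorbis.L.__asan_load2_noabort.entry)
    (hstore4 : Asan.SmallCheck Lay μ Vorbis.WayInv (Vorbis.CodeOK u₀) [.rax, .rcx, .rdx] 4 Vorbis.L.__asan_store4_noabort.entry)
    (others : List Obj) (frames : List (Nat × FrameLayout)) (u : State) (ret : Word)
    (he : AtEntry (Vorbis.conv u₀) Vorbis.L.neighbors.entry (Vorbis.Spec.neighbors.spec others frames).frame ret u)
    (hpre : (Vorbis.Spec.neighbors.spec others frames).pre u) :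
    ReachVia Lay μ Vorbis.WayInv u (Returned (Vorbis.conv u₀) (Vorbis.Spec.neighbors.spec others frames) u ret) := by
  v_entry he
  obtain ⟨hsh, hpos, hcase⟩ := hpre
  have hsp := hsh.rsp
  -- `n` as a number
  obtain ⟨n, hn⟩ : ∃ n : Nat, s32 (u.reg .rsi) = (n : Int) := ⟨(s32 (u.reg .rsi)).toNat, by omega⟩
  have hn0 : 0 < n := by omega
  obtain ⟨hnb, hn31⟩ := eq_ofNat_of_toInt _ n hn
  have hnn : (s32 (u.reg .rsi)).toNat = n := by omega
  rw [hnn] at hcase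
  obtain ⟨hlx, hlp, hlq, hdp, hdq, hdpq⟩ := hcase
  -- where the three objects are: bounds, and one two-way disjunction each against the function's stack
  obtain ⟨hx1, hx2, hx3⟩ : 0x119d40 ≤ (u.reg .rdi).toNat ∧ (u.reg .rdi).toNat + 2 * (n + 1) ≤ 0xC00000 ∧
      ((u.reg .rsp).toNat + 8 ≤ (u.reg .rdi).toNat ∨ (u.reg .rdi).toNat + 2 * (n + 1) + 112 ≤ (u.reg .rsp).toNat) := by
    have := hlx.where_ hsh.inv hsh.offText (by omega)
    omega
  obtain ⟨hp1, hp2, hp3⟩ : 0x119d40 ≤ (u.reg .rdx).toNat ∧ (u.reg .rdx).toNat + 4 ≤ 0xC00000 ∧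
      ((u.reg .rsp).toNat + 8 ≤ (u.reg .rdx).toNat ∨ (u.reg .rdx).toNat + 4 + 112 ≤ (u.reg .rsp).toNat) := by
    have := hlp.where_ hsh.inv hsh.offText (by omega)
    omega
  obtain ⟨hq1, hq2, hq3⟩ : 0x119d40 ≤ (u.reg .rcx).toNat ∧ (u.reg .rcx).toNat + 4 ≤ 0xC00000 ∧
      ((u.reg .rsp).toNat + 8 ≤ (u.reg .rcx).toNat ∨ (u.reg .rcx).toNat + 4 + 112 ≤ (u.reg .rsp).toNat) := by
    have := hlq.where_ hsh.inv hsh.offText (by omega)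
    omega
  clear hpos
  -- the array `x[0..n]` and the two cells, in the ENTRY memory
  obtain ⟨X, hX⟩ : ∃ X : Nat → Nat, ∀ j, X j = u.mem.u16 ((u.reg .rdi).toNat + 2 * j) := ⟨_, fun _ => rfl⟩
  have hX16 : ∀ j, X j < 65536 := by
    intro j
    rw [hX]
    exact Mem.u16_lt _ _
  have hXu : ∀ j, j ≤ n → u.mem.readLE (u.reg .rdi + UInt64.ofNat j * 2) 2 = X j := by
    intro j hj
    rw [hX, ← addr_idx _ _ (by omega)]
    rfl
  obtain ⟨p0, hp0⟩ : ∃ p0 : Nat, u.mem.readLE (u.reg .rdx) 4 = p0 := ⟨_, rfl⟩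
  obtain ⟨q0, hq0⟩ : ∃ q0 : Nat, u.mem.readLE (u.reg .rcx) 4 = q0 := ⟨_, rfl⟩
  -- 0x1049e0 – 0x104a13: the prologue, `i = 0`, `high = 65536`, `low = -1`
  u_walk hcode [hμ.vendor] until [Vorbis.L.neighbors.loop1] span [Vorbis.L.textLo, Vorbis.L.textHi] side (v_side)
  -- 0x104a56, the loop head (line 1335): what varies is generalised, the exact memory is replaced by what stays true
  rw [hnb] at w_r13
  obtain ⟨i, lo, hi, pv, qv, w_rbx', hile, hlo, hhi, hpv, hqv, hlow, hhigh⟩ : ∃ i lo hi pv qv : Nat,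
      s_104a13.reg .rbx = Word.ofBV (BitVec.ofNat 32 i) ∧ i ≤ n ∧
      s_104a13.mem.readLE (u.reg .rsp - 80) 4 = lo ∧ s_104a13.mem.readLE (u.reg .rsp - 76) 4 = hi ∧
      s_104a13.mem.readLE (u.reg .rdx) 4 = pv ∧ s_104a13.mem.readLE (u.reg .rcx) 4 = qv ∧
      LowInv X (X n) i lo pv p0 ∧ HighInv X (X n) i hi qv q0 := by
    refine ⟨0, 4294967295, 65536, p0, q0, w_rbx, Nat.zero_le _, ?_, ?_, ?_, ?_, LowInv.init, HighInv.init⟩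
    · u_resolve
    · u_resolve
    · u_frame hp0
    · u_frame hq0
  have hsame : Mem.SameExcept [⟨(u.reg .rsp).toNat - 112, (u.reg .rsp).toNat⟩,
      ⟨(u.reg .rdx).toNat, (u.reg .rdx).toNat + 4⟩, ⟨(u.reg .rcx).toNat, (u.reg .rcx).toNat + 4⟩] u.mem s_104a13.mem := by
    u_same
  have hun : ShadowUntouched u.mem s_104a13.mem := by v_untouched
  have hs1 : UInt64.ofNat (s_104a13.mem.readLE (u.reg .rsp - 8) 8) = u.reg .r15 := by u_resolve
  have hs2 : UInt64.ofNat (s_104a13.mem.readLE (u.reg .rsp - 16) 8) = u.reg .r14 := by u_resolve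
  have hs3 : UInt64.ofNat (s_104a13.mem.readLE (u.reg .rsp - 24) 8) = u.reg .r13 := by u_resolve
  have hs4 : UInt64.ofNat (s_104a13.mem.readLE (u.reg .rsp - 32) 8) = u.reg .r12 := by u_resolve
  have hs5 : UInt64.ofNat (s_104a13.mem.readLE (u.reg .rsp - 40) 8) = u.reg .rbp := by u_resolve
  have hs6 : UInt64.ofNat (s_104a13.mem.readLE (u.reg .rsp - 48) 8) = u.reg .rbx := by u_resolve
  have hsp1 : UInt64.ofNat (s_104a13.mem.readLE (u.reg .rsp - 72) 8) = u.reg .rdx := by u_resolve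
  have hsp2 : UInt64.ofNat (s_104a13.mem.readLE (u.reg .rsp - 64) 8) = u.reg .rcx := by u_resolve
  have hs0 : UInt64.ofNat (s_104a13.mem.readLE (u.reg .rsp) 8) = ret := by u_resolve
  have hdf : s_104a13.flags .df = false := by
    rw [w_flags]
    simp only [X86.User.df_setStatus]
    exact he_df
  replace w_kept := w_kept.mono_all
    (S' := [.rbx, .r13, .r14, .rsp, .r15, .r12, .rbp, .rdi, .rax, .rcx, .rdx]) (by rfl)
  clear w_mem w_flags w_rbx
  u_loop [i, lo, hi, pv, qv] (fun v => n - (v.reg .rbx).toNat)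
  -- the body: `movsxd` of the two indices as numbers, `x[i]` and `x[n]` in the head's memory are the entry memory's
  have hi31 : i < 2 ^ 31 := by omega
  have hsxi := sext_ofNat32 i hi31
  have hsxn := sext_ofNat32 n hn31
  have hXi : s_104a13.mem.readLE (u.reg .rdi + UInt64.ofNat i * 2) 2 = X i := by
    have hthis := hXu i hile
    u_frame hthis
  have hXn : s_104a13.mem.readLE (u.reg .rdi + UInt64.ofNat n * 2) 2 = X n := by
    have hthis := hXu n (Nat.le_refl n)
    u_frame hthis
  u_walk hcode [hμ.vendor, hsxi, hsxn] until [Vorbis.L.neighbors.loop1] span [Vorbis.L.textLo, Vorbis.L.textHi] side (v_side)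
  · -- 0x104a65: the check of the load of x[i] (line 1336)
    have hlt := lt_of_not_le32 n i hn31 hi31 hbr_104a59
    have hun' : ShadowUntouched u.mem s_104a65.mem := by v_untouched
    exact hlx.accSmall hsh.inv hun' _ 2 (by decide) (by u_omega) (by u_omega)
  · -- 0x104a30: the check of the load of x[n] (line 1337)
    have hlt := lt_of_not_le32 n i hn31 hi31 hbr_104a59
    have hun' : ShadowUntouched u.mem s_104a30.mem := by v_untouched
    exact hlx.accSmall hsh.inv hun' _ 2 (by decide) (by u_omega) (by u_omega)
  · -- 0x104a43: the check of the store to *phigh (line 1337)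
    have hlt := lt_of_not_le32 n i hn31 hi31 hbr_104a59
    have hun' : ShadowUntouched u.mem s_104a43.mem := by v_untouched
    exact hlq.accSmall hsh.inv hun' _ 4 (by decide) (by u_omega) (by u_omega)
  · -- 0x104a85: the check of the load of x[n] (line 1336)
    have hlt := lt_of_not_le32 n i hn31 hi31 hbr_104a59
    have hun' : ShadowUntouched u.mem s_104a85.mem := by v_untouched
    exact hlx.accSmall hsh.inv hun' _ 2 (by decide) (by u_omega) (by u_omega)
  · -- 0x104a30: the check of the load of x[n] (line 1337)
    have hlt := lt_of_not_le32 n i hn31 hi31 hbr_104a59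
    have hun' : ShadowUntouched u.mem s_104a30.mem := by v_untouched
    exact hlx.accSmall hsh.inv hun' _ 2 (by decide) (by u_omega) (by u_omega)
  · -- 0x104a43: the check of the store to *phigh (line 1337)
    have hlt := lt_of_not_le32 n i hn31 hi31 hbr_104a59
    have hun' : ShadowUntouched u.mem s_104a43.mem := by v_untouched
    exact hlq.accSmall hsh.inv hun' _ 4 (by decide) (by u_omega) (by u_omega)
  · -- 0x104a98: the check of the store to *plow (line 1336)
    have hlt := lt_of_not_le32 n i hn31 hi31 hbr_104a59
    have hun' : ShadowUntouched u.mem s_104a98.mem := by v_untouched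
    exact hlp.accSmall hsh.inv hun' _ 4 (by decide) (by u_omega) (by u_omega)
  · -- 0x104a30: the check of the load of x[n] (line 1337)
    have hlt := lt_of_not_le32 n i hn31 hi31 hbr_104a59
    have hun' : ShadowUntouched u.mem s_104a30.mem := by v_untouched
    exact hlx.accSmall hsh.inv hun' _ 2 (by decide) (by u_omega) (by u_omega)
  · -- 0x104a59 `jge` taken: the exit, walked to the `ret`
    have hge := le_of_le32 n i hn31 hi31 hbr_104a59
    have hin : i = n := by omega
    rw [hin] at hlow hhigh
    refine ReachVia.done (Or.inl ?_)
    v_returned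
    -- the post: the cells and the array as the invariant names them
    have hpv' : s_104abb.mem.u32 (u.reg .rdx).toNat = pv := by
      show s_104abb.mem.readLE (addr (u.reg .rdx).toNat) 4 = pv
      rw [← eq_addr (u.reg .rdx) _ rfl, w_mem]
      exact hpv
    have hqv' : s_104abb.mem.u32 (u.reg .rcx).toNat = qv := by
      show s_104abb.mem.readLE (addr (u.reg .rcx).toNat) 4 = qv
      rw [← eq_addr (u.reg .rcx) _ rfl, w_mem]
      exact hqv
    have hp0' : u.mem.u32 (u.reg .rdx).toNat = p0 := by
      show u.mem.readLE (addr (u.reg .rdx).toNat) 4 = p0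
      rw [← eq_addr (u.reg .rdx) _ rfl]
      exact hp0
    have hq0' : u.mem.u32 (u.reg .rcx).toNat = q0 := by
      show u.mem.readLE (addr (u.reg .rcx).toNat) 4 = q0
      rw [← eq_addr (u.reg .rcx) _ rfl]
      exact hq0
    obtain ⟨hl1, hl2⟩ := hlow.post
    obtain ⟨hh1, hh2⟩ := hhigh.post
    refine ⟨?_, ?_, ?_, ?_, ?_⟩
    · rw [w_mem]
      exact hun
    · rw [hnn, hn, hpv']
      simp only [← hX]
      exact hl1
    · rw [hnn, hn, hpv', hp0']
      simp only [← hX]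
      exact hl2
    · rw [hnn, hn, hqv']
      simp only [← hX]
      exact hh1
    · rw [hnn, hn, hqv', hq0']
      simp only [← hX]
      exact hh2
  · -- the back edge 0x104a53, path `x[i] ≤ low`, `x[i] ≥ high`
    have hlt := lt_of_not_le32 n i hn31 hi31 hbr_104a59
    have a_rbx : s_104a53.reg .rbx = Word.ofBV (BitVec.ofNat 32 (i + 1)) := by
      rw [w_rbx, ofNat_succ32]
    have a_le : i + 1 ≤ n := by omega
    rw [zx_toInt _ (hX16 i)] at hbr_104a79
    have a_low : LowInv X (X n) (i + 1) lo pv p0 := hlow.skip_le hbr_104a79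
    have a_lo : s_104a53.mem.readLE (u.reg .rsp - 80) 4 = lo := by
      u_frame hlo
    have a_pv : s_104a53.mem.readLE (u.reg .rdx) 4 = pv := by
      u_frame hpv
    rw [zx_toInt _ (hX16 i)] at hbr_104a24
    have a_high : HighInv X (X n) (i + 1) hi qv q0 := hhigh.skip_ge hX16 hbr_104a24
    have a_hi : s_104a53.mem.readLE (u.reg .rsp - 76) 4 = hi := by
      u_frame hhi
    have a_qv : s_104a53.mem.readLE (u.reg .rcx) 4 = qv := by
      u_frame hqv
    have a_un : ShadowUntouched u.mem s_104a53.mem := by v_untouched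
    have a_df : s_104a53.flags .df = false := by
      rw [w_flags]
      simp only [X86.User.df_setStatus]
      with_reducible assumption
    u_loop_back [i + 1, lo, hi, pv, qv]
    rw [a_rbx, cnt_toNat _ (by omega), cnt_toNat _ (by omega)]
    omega
  · -- the back edge 0x104a53, path `x[i] ≤ low`, `x[i] ≤ x[n]`
    have hlt := lt_of_not_le32 n i hn31 hi31 hbr_104a59
    have a_rbx : s_104a53.reg .rbx = Word.ofBV (BitVec.ofNat 32 (i + 1)) := by
      rw [w_rbx, ofNat_succ32]
    have a_le : i + 1 ≤ n := by omega
    rw [zx_toInt _ (hX16 i)] at hbr_104a79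
    have a_low : LowInv X (X n) (i + 1) lo pv p0 := hlow.skip_le hbr_104a79
    have a_lo : s_104a53.mem.readLE (u.reg .rsp - 80) 4 = lo := by
      u_frame hlo
    have a_pv : s_104a53.mem.readLE (u.reg .rdx) 4 = pv := by
      u_frame hpv
    rw [sw_toNat _ (hX16 i), Nat.mod_eq_of_lt (hX16 n)] at hbr_104a39
    have a_high : HighInv X (X n) (i + 1) hi qv q0 := hhigh.skip_le hbr_104a39
    have a_hi : s_104a53.mem.readLE (u.reg .rsp - 76) 4 = hi := by
      u_frame hhi
    have a_qv : s_104a53.mem.readLE (u.reg .rcx) 4 = qv := by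
      u_frame hqv
    have a_un : ShadowUntouched u.mem s_104a53.mem := by v_untouched
    have a_df : s_104a53.flags .df = false := by
      rw [w_flags]
      simp only [X86.User.df_setStatus]
      with_reducible assumption
    u_loop_back [i + 1, lo, hi, pv, qv]
    rw [a_rbx, cnt_toNat _ (by omega), cnt_toNat _ (by omega)]
    omega
  · -- the back edge 0x104a53, path `x[i] ≤ low`, `*phigh = i ; high = x[i]`
    have hlt := lt_of_not_le32 n i hn31 hi31 hbr_104a59
    have a_rbx : s_104a53.reg .rbx = Word.ofBV (BitVec.ofNat 32 (i + 1)) := by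
      rw [w_rbx, ofNat_succ32]
    have a_le : i + 1 ≤ n := by omega
    rw [zx_toInt _ (hX16 i)] at hbr_104a79
    have a_low : LowInv X (X n) (i + 1) lo pv p0 := hlow.skip_le hbr_104a79
    have a_lo : s_104a53.mem.readLE (u.reg .rsp - 80) 4 = lo := by
      u_frame hlo
    have a_pv : s_104a53.mem.readLE (u.reg .rdx) 4 = pv := by
      u_frame hpv
    rw [sw_toNat _ (hX16 i), Nat.mod_eq_of_lt (hX16 n)] at hbr_104a39
    have a_high : HighInv X (X n) (i + 1) (X i) i q0 := HighInv.update hbr_104a39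
    have a_hi : s_104a53.mem.readLE (u.reg .rsp - 76) 4 = X i := by
      have e : s_104a53.mem.readLE (u.reg .rsp - 76) 4 = (BitVec.zeroExtend 32 (BitVec.ofNat 16 (X i))).toNat := by
        u_resolve
        exact Nat.mod_eq_of_lt (BitVec.isLt _)
      rw [e, zx_toNat _ (hX16 i)]
    have a_qv : s_104a53.mem.readLE (u.reg .rcx) 4 = i := by
      have e : s_104a53.mem.readLE (u.reg .rcx) 4 = (BitVec.ofNat 32 i).toNat := by
        u_resolve
        exact Nat.mod_eq_of_lt (BitVec.isLt _)
      rw [e, Vorbis.Spec.toNat_ofNat32 _ (by omega)]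
    have a_un : ShadowUntouched u.mem s_104a53.mem := by v_untouched
    have a_df : s_104a53.flags .df = false := by
      rw [w_flags]
      simp only [X86.User.df_setStatus]
      with_reducible assumption
    u_loop_back [i + 1, lo, X i, pv, i]
    rw [a_rbx, cnt_toNat _ (by omega), cnt_toNat _ (by omega)]
    omega
  · -- the back edge 0x104a53, path `x[i] ≥ x[n]`, `x[i] ≥ high`
    have hlt := lt_of_not_le32 n i hn31 hi31 hbr_104a59
    have a_rbx : s_104a53.reg .rbx = Word.ofBV (BitVec.ofNat 32 (i + 1)) := by
      rw [w_rbx, ofNat_succ32]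
    have a_le : i + 1 ≤ n := by omega
    rw [sw_toNat _ (hX16 i), Nat.mod_eq_of_lt (hX16 n)] at hbr_104a8e
    have a_low : LowInv X (X n) (i + 1) lo pv p0 := hlow.skip_ge hbr_104a8e
    have a_lo : s_104a53.mem.readLE (u.reg .rsp - 80) 4 = lo := by
      u_frame hlo
    have a_pv : s_104a53.mem.readLE (u.reg .rdx) 4 = pv := by
      u_frame hpv
    rw [zx_toInt _ (hX16 i)] at hbr_104a24
    have a_high : HighInv X (X n) (i + 1) hi qv q0 := hhigh.skip_ge hX16 hbr_104a24
    have a_hi : s_104a53.mem.readLE (u.reg .rsp - 76) 4 = hi := by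
      u_frame hhi
    have a_qv : s_104a53.mem.readLE (u.reg .rcx) 4 = qv := by
      u_frame hqv
    have a_un : ShadowUntouched u.mem s_104a53.mem := by v_untouched
    have a_df : s_104a53.flags .df = false := by
      rw [w_flags]
      simp only [X86.User.df_setStatus]
      with_reducible assumption
    u_loop_back [i + 1, lo, hi, pv, qv]
    rw [a_rbx, cnt_toNat _ (by omega), cnt_toNat _ (by omega)]
    omega
  · -- the back edge 0x104a53, path `x[i] ≥ x[n]`, `x[i] ≤ x[n]`
    have hlt := lt_of_not_le32 n i hn31 hi31 hbr_104a59
    have a_rbx : s_104a53.reg .rbx = Word.ofBV (BitVec.ofNat 32 (i + 1)) := by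
      rw [w_rbx, ofNat_succ32]
    have a_le : i + 1 ≤ n := by omega
    rw [sw_toNat _ (hX16 i), Nat.mod_eq_of_lt (hX16 n)] at hbr_104a8e
    have a_low : LowInv X (X n) (i + 1) lo pv p0 := hlow.skip_ge hbr_104a8e
    have a_lo : s_104a53.mem.readLE (u.reg .rsp - 80) 4 = lo := by
      u_frame hlo
    have a_pv : s_104a53.mem.readLE (u.reg .rdx) 4 = pv := by
      u_frame hpv
    rw [sw_toNat _ (hX16 i), Nat.mod_eq_of_lt (hX16 n)] at hbr_104a39
    have a_high : HighInv X (X n) (i + 1) hi qv q0 := hhigh.skip_le hbr_104a39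
    have a_hi : s_104a53.mem.readLE (u.reg .rsp - 76) 4 = hi := by
      u_frame hhi
    have a_qv : s_104a53.mem.readLE (u.reg .rcx) 4 = qv := by
      u_frame hqv
    have a_un : ShadowUntouched u.mem s_104a53.mem := by v_untouched
    have a_df : s_104a53.flags .df = false := by
      rw [w_flags]
      simp only [X86.User.df_setStatus]
      with_reducible assumption
    u_loop_back [i + 1, lo, hi, pv, qv]
    rw [a_rbx, cnt_toNat _ (by omega), cnt_toNat _ (by omega)]
    omega
  · -- the back edge 0x104a53, path `x[i] ≥ x[n]`, `*phigh = i ; high = x[i]`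
    have hlt := lt_of_not_le32 n i hn31 hi31 hbr_104a59
    have a_rbx : s_104a53.reg .rbx = Word.ofBV (BitVec.ofNat 32 (i + 1)) := by
      rw [w_rbx, ofNat_succ32]
    have a_le : i + 1 ≤ n := by omega
    rw [sw_toNat _ (hX16 i), Nat.mod_eq_of_lt (hX16 n)] at hbr_104a8e
    have a_low : LowInv X (X n) (i + 1) lo pv p0 := hlow.skip_ge hbr_104a8e
    have a_lo : s_104a53.mem.readLE (u.reg .rsp - 80) 4 = lo := by
      u_frame hlo
    have a_pv : s_104a53.mem.readLE (u.reg .rdx) 4 = pv := by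
      u_frame hpv
    rw [sw_toNat _ (hX16 i), Nat.mod_eq_of_lt (hX16 n)] at hbr_104a39
    have a_high : HighInv X (X n) (i + 1) (X i) i q0 := HighInv.update hbr_104a39
    have a_hi : s_104a53.mem.readLE (u.reg .rsp - 76) 4 = X i := by
      have e : s_104a53.mem.readLE (u.reg .rsp - 76) 4 = (BitVec.zeroExtend 32 (BitVec.ofNat 16 (X i))).toNat := by
        u_resolve
        exact Nat.mod_eq_of_lt (BitVec.isLt _)
      rw [e, zx_toNat _ (hX16 i)]
    have a_qv : s_104a53.mem.readLE (u.reg .rcx) 4 = i := by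
      have e : s_104a53.mem.readLE (u.reg .rcx) 4 = (BitVec.ofNat 32 i).toNat := by
        u_resolve
        exact Nat.mod_eq_of_lt (BitVec.isLt _)
      rw [e, Vorbis.Spec.toNat_ofNat32 _ (by omega)]
    have a_un : ShadowUntouched u.mem s_104a53.mem := by v_untouched
    have a_df : s_104a53.flags .df = false := by
      rw [w_flags]
      simp only [X86.User.df_setStatus]
      with_reducible assumption
    u_loop_back [i + 1, lo, X i, pv, i]
    rw [a_rbx, cnt_toNat _ (by omega), cnt_toNat _ (by omega)]
    omega
  · -- the back edge 0x104a53, path `*plow = i ; low = x[i]`, `x[i] ≥ high`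
    have hlt := lt_of_not_le32 n i hn31 hi31 hbr_104a59
    have a_rbx : s_104a53.reg .rbx = Word.ofBV (BitVec.ofNat 32 (i + 1)) := by
      rw [w_rbx, ofNat_succ32]
    have a_le : i + 1 ≤ n := by omega
    rw [sw_toNat _ (hX16 i), Nat.mod_eq_of_lt (hX16 n)] at hbr_104a8e
    have a_low : LowInv X (X n) (i + 1) (X i) i p0 := LowInv.update hbr_104a8e
    have a_lo : s_104a53.mem.readLE (u.reg .rsp - 80) 4 = X i := by
      have e : s_104a53.mem.readLE (u.reg .rsp - 80) 4 = (BitVec.zeroExtend 32 (BitVec.ofNat 16 (X i))).toNat := by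
        u_resolve
        exact Nat.mod_eq_of_lt (BitVec.isLt _)
      rw [e, zx_toNat _ (hX16 i)]
    have a_pv : s_104a53.mem.readLE (u.reg .rdx) 4 = i := by
      have e : s_104a53.mem.readLE (u.reg .rdx) 4 = (BitVec.ofNat 32 i).toNat := by
        u_resolve
        exact Nat.mod_eq_of_lt (BitVec.isLt _)
      rw [e, Vorbis.Spec.toNat_ofNat32 _ (by omega)]
    rw [zx_toInt _ (hX16 i)] at hbr_104a24
    have a_high : HighInv X (X n) (i + 1) hi qv q0 := hhigh.skip_ge hX16 hbr_104a24
    have a_hi : s_104a53.mem.readLE (u.reg .rsp - 76) 4 = hi := by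
      u_frame hhi
    have a_qv : s_104a53.mem.readLE (u.reg .rcx) 4 = qv := by
      u_frame hqv
    have a_un : ShadowUntouched u.mem s_104a53.mem := by v_untouched
    have a_df : s_104a53.flags .df = false := by
      rw [w_flags]
      simp only [X86.User.df_setStatus]
      with_reducible assumption
    u_loop_back [i + 1, X i, hi, i, qv]
    rw [a_rbx, cnt_toNat _ (by omega), cnt_toNat _ (by omega)]
    omega
  · -- the back edge 0x104a53, path `*plow = i ; low = x[i]`, `x[i] ≤ x[n]`
    have hlt := lt_of_not_le32 n i hn31 hi31 hbr_104a59
    have a_rbx : s_104a53.reg .rbx = Word.ofBV (BitVec.ofNat 32 (i + 1)) := by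
      rw [w_rbx, ofNat_succ32]
    have a_le : i + 1 ≤ n := by omega
    rw [sw_toNat _ (hX16 i), Nat.mod_eq_of_lt (hX16 n)] at hbr_104a8e
    have a_low : LowInv X (X n) (i + 1) (X i) i p0 := LowInv.update hbr_104a8e
    have a_lo : s_104a53.mem.readLE (u.reg .rsp - 80) 4 = X i := by
      have e : s_104a53.mem.readLE (u.reg .rsp - 80) 4 = (BitVec.zeroExtend 32 (BitVec.ofNat 16 (X i))).toNat := by
        u_resolve
        exact Nat.mod_eq_of_lt (BitVec.isLt _)
      rw [e, zx_toNat _ (hX16 i)]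
    have a_pv : s_104a53.mem.readLE (u.reg .rdx) 4 = i := by
      have e : s_104a53.mem.readLE (u.reg .rdx) 4 = (BitVec.ofNat 32 i).toNat := by
        u_resolve
        exact Nat.mod_eq_of_lt (BitVec.isLt _)
      rw [e, Vorbis.Spec.toNat_ofNat32 _ (by omega)]
    rw [sw_toNat _ (hX16 i), Nat.mod_eq_of_lt (hX16 n)] at hbr_104a39
    have a_high : HighInv X (X n) (i + 1) hi qv q0 := hhigh.skip_le hbr_104a39
    have a_hi : s_104a53.mem.readLE (u.reg .rsp - 76) 4 = hi := by
      u_frame hhi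
    have a_qv : s_104a53.mem.readLE (u.reg .rcx) 4 = qv := by
      u_frame hqv
    have a_un : ShadowUntouched u.mem s_104a53.mem := by v_untouched
    have a_df : s_104a53.flags .df = false := by
      rw [w_flags]
      simp only [X86.User.df_setStatus]
      with_reducible assumption
    u_loop_back [i + 1, X i, hi, i, qv]
    rw [a_rbx, cnt_toNat _ (by omega), cnt_toNat _ (by omega)]
    omega
  -- (the ninth path, both cells updated, is pruned by the walker: `x[i] < x[n] < x[i]`)

end Vorbis.Spec.neighbors
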